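-- pv_equiv track=rewrite | github.com/Njoro24/My-ClimateBE | app/services/metta_service.py | _determine_atom_type
-- ===== SOURCE A (Python) =====
-- def _determine_atom_type(atom_content: str) -> str:
--     """Determine atom type from content"""
--     atom_type_mapping = {
--         '(user ': 'user',
--         '(event ': 'event',
--         '(location ': 'location',
--         '(evidence-link ': 'evidence',
--         '(impact ': 'impact',
--         '(verified ': 'verification',
--         '(trust-score ': 'trust',
--         '(reports ': 'relationship',
--         '(event-type ': 'classification',
--         '(timestamp ': 'temporal',
--         '(gps-coords ': 'spatial',
--         '(description ': 'descriptive',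
--         '(severity ': 'assessment',
--         '(wallet-address ': 'financial'
--     }
--
--     for prefix, atom_type in atom_type_mapping.items():
--         if atom_content.startswith(prefix):
--             return atom_type
--
--     return 'other'
-- ===== SOURCE B (Python) =====
-- def _determine_atom_type(atom_content: str) -> str:
--     """Determine atom type from content"""
--     if not atom_content.startswith('('):
--         return 'other'
--     token, sep, _tail = atom_content[1:].partition(' ')
--     if not sep:
--         return 'other'
--     if token == 'user':
--         return 'user'
--     elif token == 'event':
--         return 'event'
--     elif token == 'location':
--         return 'location'
--     elif token == 'evidence-link':
--         return 'evidence'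
--     elif token == 'impact':
--         return 'impact'
--     elif token == 'verified':
--         return 'verification'
--     elif token == 'trust-score':
--         return 'trust'
--     elif token == 'reports':
--         return 'relationship'
--     elif token == 'event-type':
--         return 'classification'
--     elif token == 'timestamp':
--         return 'temporal'
--     elif token == 'gps-coords':
--         return 'spatial'
--     elif token == 'description':
--         return 'descriptive'
--     elif token == 'severity':
--         return 'assessment'
--     elif token == 'wallet-address':
--         return 'financial'
--     else:
--         return 'other'
-- ===== Notes on version B (the rewrite author's own statement) =====
-- stated objective: alternative
-- what changed: Instead of scanning the 14 fixed prefixes over a dict, B parses the keyword token once (leading-paren guard, then partition at the first space) and classifies that single token with an equality chain.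
import Mathlib
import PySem

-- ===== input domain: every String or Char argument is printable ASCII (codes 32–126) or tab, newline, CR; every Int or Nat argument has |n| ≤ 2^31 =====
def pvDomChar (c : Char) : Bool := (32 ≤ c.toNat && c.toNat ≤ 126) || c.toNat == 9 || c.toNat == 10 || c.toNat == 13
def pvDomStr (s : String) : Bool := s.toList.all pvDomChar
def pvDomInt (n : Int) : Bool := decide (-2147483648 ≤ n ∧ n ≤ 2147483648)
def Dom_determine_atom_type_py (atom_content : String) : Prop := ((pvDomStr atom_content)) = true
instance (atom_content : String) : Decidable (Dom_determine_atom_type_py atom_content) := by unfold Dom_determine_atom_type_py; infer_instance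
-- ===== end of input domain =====

-- B replaces A's scan of the 14 fixed prefixes over a dict by parsing the keyword
-- token once (leading-paren guard, partition at the first space) and classifying that
-- single token with an equality chain (alternative decomposition, same cost class).

-- ===== PORT A =====
-- the dict literal A builds
def pvAtomTypeMapping : PySem.Dict String String := PySem.Dict.ofList
  [("(user ", "user"), ("(event ", "event"), ("(location ", "location"),
   ("(evidence-link ", "evidence"), ("(impact ", "impact"), ("(verified ", "verification"),
   ("(trust-score ", "trust"), ("(reports ", "relationship"), ("(event-type ", "classification"),
   ("(timestamp ", "temporal"), ("(gps-coords ", "spatial"), ("(description ", "descriptive"),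
   ("(severity ", "assessment"), ("(wallet-address ", "financial")]

-- 'for prefix, atom_type in mapping.items(): if atom_content.startswith(prefix): return atom_type'
def pvLoopA (atom_content : String) : List (String × String) → String
  | [] => "other"
  | (pre, ty) :: rest =>
      if PySem.Str.startswith atom_content pre then ty else pvLoopA atom_content rest

def determine_atom_type_py (atom_content : String) : String :=
  pvLoopA atom_content pvAtomTypeMapping.items

-- ===== PORT B =====
-- port of "token, sep, _tail = cs.partition(' '); if not sep: …": returns none when
-- sep is empty (no space present), otherwise some (chars of token before the first space)
def pvPartitionTok : List Char → Option (List Char)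
  | [] => none
  | c :: cs => if c = ' ' then some [] else (pvPartitionTok cs).map (c :: ·)

-- the if/elif equality chain of Source B
def pvLabelOf (token : String) : String :=
  if token = "user" then "user"
  else if token = "event" then "event"
  else if token = "location" then "location"
  else if token = "evidence-link" then "evidence"
  else if token = "impact" then "impact"
  else if token = "verified" then "verification"
  else if token = "trust-score" then "trust"
  else if token = "reports" then "relationship"
  else if token = "event-type" then "classification"
  else if token = "timestamp" then "temporal"
  else if token = "gps-coords" then "spatial"
  else if token = "description" then "descriptive"
  else if token = "severity" then "assessment"
  else if token = "wallet-address" then "financial"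
  else "other"

def determine_atom_type_py_alt (atom_content : String) : String :=
  if PySem.Str.startswith atom_content "(" then
    -- atom_content[1:] (nonnegative slice = drop 1), then partition(' ')
    match pvPartitionTok (atom_content.toList.drop 1) with
    | some token => pvLabelOf (String.ofList token)
    | none => "other"
  else "other"

-- ===== PRECONDITION & SPEC =====
def Spec_determine_atom_type_py (atom_content : String) (out : String) : Prop := out = determine_atom_type_py_alt atom_content
instance (atom_content : String) (out : String) : Decidable (Spec_determine_atom_type_py atom_content out) := by unfold Spec_determine_atom_type_py; infer_instance

-- ===== CLAIM (what is proved, stated in full; the proofs are below) =====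
def Claim_equal_determine_atom_type_py : Prop := ∀ (atom_content : String), Dom_determine_atom_type_py atom_content → Spec_determine_atom_type_py atom_content (determine_atom_type_py atom_content)

-- ===== LEMMAS AND PROOFS =====

-- pvPartitionTok characterises 'tok ++ [' '] is a prefix' for space-free tok
theorem pvPartition_iff (rest : List Char) : ∀ (tok : List Char), ' ' ∉ tok →
    ((tok ++ [' ']) <+: rest ↔ pvPartitionTok rest = some tok) := by
  induction rest with
  | nil =>
      intro tok _
      constructor
      · rintro ⟨t, ht⟩; simp at ht
      · intro h; simp [pvPartitionTok] at h
  | cons c cs ih =>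
      intro tok hnosp
      cases tok with
      | nil =>
          simp only [List.nil_append, pvPartitionTok]
          constructor
          · rintro ⟨t, ht⟩
            have : c = ' ' := by simpa using congrArg (·.head?) ht.symm
            simp [this]
          · intro h
            by_cases hc : c = ' '
            · exact ⟨cs, by simp [hc]⟩
            · simp [hc] at h
      | cons t ts =>
          have hne : t ≠ ' ' := fun h => hnosp (by simp [h])
          have hts : ' ' ∉ ts := fun h => hnosp (by simp [h])
          constructor
          · rintro ⟨u, hu⟩
            simp only [List.cons_append, List.cons.injEq] at hu
            obtain ⟨hct, hrest⟩ := hu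
            subst hct
            have : pvPartitionTok cs = some ts :=
              (ih ts hts).mp ⟨u, hrest⟩
            simp [pvPartitionTok, hne, this]
          · intro h
            simp only [pvPartitionTok] at h
            by_cases hc : c = ' '
            · simp [hc] at h
            · rw [if_neg hc, Option.map_eq_some_iff] at h
              obtain ⟨ts', hts', heq⟩ := h
              injection heq with h1 h2
              subst h1; subst h2
              obtain ⟨u, hu⟩ := (ih _ hts).mpr hts'
              exact ⟨u, by simp [← hu]⟩

-- each branch condition of A, rewritten through pvPartitionTok
theorem pvCondB (s : String) (rest : List Char) (hs : s.toList = '(' :: rest)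
    (pre tok : String) (hpre : pre.toList = '(' :: (tok.toList ++ [' ']))
    (hnosp : ' ' ∉ tok.toList) :
    PySem.Str.startswith s pre = (pvPartitionTok rest == some tok.toList) := by
  rw [Bool.eq_iff_iff, beq_iff_eq]
  rw [show (PySem.Str.startswith s pre = true) ↔ pre.toList <+: s.toList from by
    simp [PySem.Chars.startswith_iff]]
  rw [hs, hpre, List.cons_prefix_cons]
  simp only [true_and]
  exact pvPartition_iff rest tok.toList hnosp

theorem pvItemsA : pvAtomTypeMapping.items =
  [("(user ", "user"), ("(event ", "event"), ("(location ", "location"),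
   ("(evidence-link ", "evidence"), ("(impact ", "impact"), ("(verified ", "verification"),
   ("(trust-score ", "trust"), ("(reports ", "relationship"), ("(event-type ", "classification"),
   ("(timestamp ", "temporal"), ("(gps-coords ", "spatial"), ("(description ", "descriptive"),
   ("(severity ", "assessment"), ("(wallet-address ", "financial")] := by decide

theorem pv_main (s : String) : determine_atom_type_py s = determine_atom_type_py_alt s := by
  by_cases hb : PySem.Str.startswith s "(" = true
  · obtain ⟨rest, hs⟩ : ∃ rest, s.toList = '(' :: rest := by
      have : ("(" : String).toList <+: s.toList := by
        simpa [PySem.Chars.startswith_iff] using hb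
      obtain ⟨t, ht⟩ := this
      exact ⟨t, by simpa using ht.symm⟩
    have hdrop : s.toList.drop 1 = rest := by rw [hs]; rfl
    have c01 := pvCondB s rest hs "(user " "user" (by decide) (by decide)
    have c02 := pvCondB s rest hs "(event " "event" (by decide) (by decide)
    have c03 := pvCondB s rest hs "(location " "location" (by decide) (by decide)
    have c04 := pvCondB s rest hs "(evidence-link " "evidence-link" (by decide) (by decide)
    have c05 := pvCondB s rest hs "(impact " "impact" (by decide) (by decide)
    have c06 := pvCondB s rest hs "(verified " "verified" (by decide) (by decide)
    have c07 := pvCondB s rest hs "(trust-score " "trust-score" (by decide) (by decide)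
    have c08 := pvCondB s rest hs "(reports " "reports" (by decide) (by decide)
    have c09 := pvCondB s rest hs "(event-type " "event-type" (by decide) (by decide)
    have c10 := pvCondB s rest hs "(timestamp " "timestamp" (by decide) (by decide)
    have c11 := pvCondB s rest hs "(gps-coords " "gps-coords" (by decide) (by decide)
    have c12 := pvCondB s rest hs "(description " "description" (by decide) (by decide)
    have c13 := pvCondB s rest hs "(severity " "severity" (by decide) (by decide)
    have c14 := pvCondB s rest hs "(wallet-address " "wallet-address" (by decide) (by decide)
    show pvLoopA s pvAtomTypeMapping.items = _
    rw [pvItemsA]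
    simp only [pvLoopA, c01, c02, c03, c04, c05, c06, c07, c08, c09, c10, c11, c12, c13, c14]
    rw [determine_atom_type_py_alt, if_pos hb, hdrop]
    cases h : pvPartitionTok rest with
    | none => simp
    | some tokL =>
        have hmk : ∀ (k : String), (some tokL == some k.toList) = decide (String.ofList tokL = k) := by
          intro k
          rw [Bool.eq_iff_iff, beq_iff_eq, decide_eq_true_iff, Option.some.injEq]
          constructor
          · rintro rfl; exact String.ofList_toList
          · rintro rfl; exact String.toList_ofList.symm
        simp only [hmk, decide_eq_true_eq]
        rw [pvLabelOf]
  · have hp : ¬ ∃ rest, s.toList = '(' :: rest := by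
      rintro ⟨rest, hs⟩
      exact hb (by simp [PySem.Chars.startswith_iff, hs])
    have hA : ∀ (pre ty x : String), pre.toList.head? = some '(' →
        (if PySem.Str.startswith s pre then ty else x) = x := by
      intro pre ty x hl
      obtain ⟨c, l, hcl⟩ : ∃ c l, pre.toList = c :: l := by
        cases h : pre.toList with
        | nil => rw [h] at hl; simp at hl
        | cons c l => exact ⟨c, l, rfl⟩
      rw [hcl] at hl
      simp at hl
      rw [if_neg]
      intro hsw
      have hpre : pre.toList <+: s.toList := by
        simpa [PySem.Chars.startswith_iff] using hsw
      rw [hcl, hl] at hpre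
      obtain ⟨t, ht⟩ := hpre
      exact hp ⟨l ++ t, by simpa using ht.symm⟩
    show pvLoopA s pvAtomTypeMapping.items = _
    rw [pvItemsA]
    simp only [pvLoopA]
    rw [hA _ _ _ (by decide), hA _ _ _ (by decide), hA _ _ _ (by decide),
        hA _ _ _ (by decide), hA _ _ _ (by decide), hA _ _ _ (by decide),
        hA _ _ _ (by decide), hA _ _ _ (by decide), hA _ _ _ (by decide),
        hA _ _ _ (by decide), hA _ _ _ (by decide), hA _ _ _ (by decide),
        hA _ _ _ (by decide), hA _ _ _ (by decide)]
    rw [determine_atom_type_py_alt, if_neg hb]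

-- ===== VERDICT (by name: the statement is the Claim_ definition above) =====
theorem determine_atom_type_py_spec : Claim_equal_determine_atom_type_py := by
  intro s _
  show determine_atom_type_py s = determine_atom_type_py_alt s
  exact pv_main s
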